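-- pv_equiv track=rewrite | github.com/sebasibarguen/semantic-shift-freedom | src/corpus_manifest.py | contiguous_missing_years
-- ===== SOURCE A (Python) =====
-- def contiguous_missing_years(years: list[int]) -> list[dict]:
--     """Return missing-year ranges inside the observed min/max year span."""
--     if not years:
--         return []
--     year_set = set(years)
--     missing = [y for y in range(min(years), max(years) + 1) if y not in year_set]
--     if not missing:
--         return []
--
--     ranges = []
--     start = prev = missing[0]
--     for year in missing[1:]:
--         if year == prev + 1:
--             prev = year
--             continue
--         ranges.append({"start": start, "end": prev, "n_years": prev - start + 1})
--         start = prev = year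
--     ranges.append({"start": start, "end": prev, "n_years": prev - start + 1})
--     return ranges
-- ===== SOURCE B (Python) =====
-- def contiguous_missing_years(years: list[int]) -> list[dict]:
--     """Return missing-year ranges inside the observed min/max year span."""
--     present = sorted(set(years))
--     out = []
--     for prev, cur in zip(present, present[1:]):
--         if cur - prev > 1:
--             out.append({"start": prev + 1, "end": cur - 1, "n_years": cur - prev - 1})
--     return out
-- ===== Notes on version B (the rewrite author's own statement) =====
-- stated objective: faster
-- what changed: Instead of materialising every year in range(min,max+1), testing set membership, and run-length grouping the missing list, B sorts the distinct present years once and emits one range per gap between consecutive present years.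
import Mathlib
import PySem

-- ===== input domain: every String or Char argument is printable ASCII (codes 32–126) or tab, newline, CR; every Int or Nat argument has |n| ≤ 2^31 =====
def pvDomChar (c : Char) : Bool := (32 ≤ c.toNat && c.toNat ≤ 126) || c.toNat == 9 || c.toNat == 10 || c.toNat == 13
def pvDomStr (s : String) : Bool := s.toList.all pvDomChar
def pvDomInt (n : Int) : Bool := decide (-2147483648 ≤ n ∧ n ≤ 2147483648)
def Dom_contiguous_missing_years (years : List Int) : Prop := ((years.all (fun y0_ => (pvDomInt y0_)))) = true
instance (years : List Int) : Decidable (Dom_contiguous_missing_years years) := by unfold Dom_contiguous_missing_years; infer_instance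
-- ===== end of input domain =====

-- B replaces A's scan over every year of range(min,max+1) by a single pass over the
-- sorted distinct years, emitting one range per gap between consecutive present years (faster).


-- ===== PORT A =====
def contiguous_missing_years (years : List Int) : List (List (String × Int)) :=
  if years = [] then []
  else
    let year_set := PySem.Set.ofList years
    match PySem.List.min? years (fun y => y), PySem.List.max? years (fun y => y) with
    | some lo, some hi =>
      let missing := (PySem.List.pyRange lo (hi + 1) 1).filter
        (fun y => !(PySem.Set.contains year_set y))
      match missing with
      | [] => []
      | m0 :: rest =>
        let st := rest.foldl
          (fun (acc : List (List (String × Int)) × Int × Int) year =>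
            if year = acc.2.2 + 1 then (acc.1, acc.2.1, year)
            else (acc.1 ++ [[("start", acc.2.1), ("end", acc.2.2),
                             ("n_years", acc.2.2 - acc.2.1 + 1)]], year, year))
          ([], m0, m0)
        st.1 ++ [[("start", st.2.1), ("end", st.2.2), ("n_years", st.2.2 - st.2.1 + 1)]]
    | _, _ => []   -- unreachable: years ≠ [] means min/max exist

-- ===== PORT B =====
def contiguous_missing_years_alt (years : List Int) : List (List (String × Int)) :=
  let present := PySem.List.sorted (PySem.Set.ofList years) (fun x => x) false
  (present.zip (PySem.List.slice present (some 1) none)).foldl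
    (fun out (pc : Int × Int) =>
      if pc.2 - pc.1 > 1 then
        out ++ [[("start", pc.1 + 1), ("end", pc.2 - 1), ("n_years", pc.2 - pc.1 - 1)]]
      else out) []

-- ===== PRECONDITION & SPEC =====
def Spec_contiguous_missing_years (years : List Int) (out : List (List (String × Int))) : Prop := out = contiguous_missing_years_alt years
instance (years : List Int) (out : List (List (String × Int))) : Decidable (Spec_contiguous_missing_years years out) := by unfold Spec_contiguous_missing_years; infer_instance

-- ===== CLAIM (what is proved, stated in full; the proofs are below) =====
def Claim_equal_contiguous_missing_years : Prop := ∀ (years : List Int), Dom_contiguous_missing_years years → Spec_contiguous_missing_years years (contiguous_missing_years years)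

-- ===== LEMMAS AND PROOFS =====

-- A's range-dict of one missing run [s..p]
def mkA (s p : Int) : List (String × Int) :=
  [("start", s), ("end", p), ("n_years", p - s + 1)]

-- A's loop body
def stepA (acc : List (List (String × Int)) × Int × Int) (year : Int) :
    List (List (String × Int)) × Int × Int :=
  if year = acc.2.2 + 1 then (acc.1, acc.2.1, year)
  else (acc.1 ++ [mkA acc.2.1 acc.2.2], year, year)

def finishA (acc : List (List (String × Int)) × Int × Int) : List (List (String × Int)) :=
  acc.1 ++ [mkA acc.2.1 acc.2.2]

-- the missing years between consecutive present years of a :: t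
def mlist (a : Int) : List Int → List Int
  | [] => []
  | b :: t => PySem.List.pyRange (a + 1) b 1 ++ mlist b t

-- B's gap ranges along a :: t
def gaps (a : Int) : List Int → List (List (String × Int))
  | [] => []
  | b :: t => (if 1 < b - a then [[("start", a + 1), ("end", b - 1), ("n_years", b - a - 1)]]
               else []) ++ gaps b t

-- a run of consecutive missing years just extends prev
theorem runA (n : Nat) : ∀ (p : Int) (r : List (List (String × Int))) (s : Int),
    List.foldl stepA (r, s, p) (PySem.List.pyRange (p + 1) (p + 1 + n) 1) = (r, s, p + n) := by
  induction n with
  | zero =>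
    intro p r s
    push_cast
    rw [PySem.List.pyRange_one_eq_nil (by omega : (p:Int) + 1 + 0 ≤ p + 1)]
    simp
  | succ m ih =>
    intro p r s
    push_cast
    rw [PySem.List.pyRange_one_cons (by omega : (p:Int) + 1 < p + 1 + (m + 1))]
    simp only [List.foldl_cons]
    rw [show stepA (r, s, p) (p + 1) = (r, s, p + 1) by simp [stepA]]
    have := ih (p + 1) r s
    push_cast at this
    have h2 : (p:Int) + 1 + 1 + m = p + 1 + (m + 1) := by ring
    rw [h2] at this
    rw [this]; congr 2; omega

theorem runA' (p b : Int) (hb : p + 1 ≤ b) (r : List (List (String × Int))) (s : Int) :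
    List.foldl stepA (r, s, p) (PySem.List.pyRange (p + 1) b 1) = (r, s, b - 1) := by
  have h : b = p + 1 + ((b - p - 1).toNat : Int) := by omega
  rw [h, runA]; congr 2; omega

theorem mainA : ∀ (t : List Int) (a : Int) (r : List (List (String × Int))) (s p : Int),
    p < a → (a :: t).Pairwise (· < ·) →
    finishA (List.foldl stepA (r, s, p) (mlist a t)) = (r ++ [mkA s p]) ++ gaps a t := by
  intro t
  induction t with
  | nil => intro a r s p _ _; simp [mlist, gaps, finishA]
  | cons b t ih =>
    intro a r s p hpa hpw
    have hab : a < b := (List.pairwise_cons.mp hpw).1 b (by simp)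
    have hpw' : (b :: t).Pairwise (· < ·) := (List.pairwise_cons.mp hpw).2
    simp only [mlist, List.foldl_append]
    by_cases hgap : a + 1 < b
    · rw [PySem.List.pyRange_one_cons hgap]
      simp only [List.foldl_cons]
      have hne : ¬ (a + 1 = p + 1) := by omega
      rw [show stepA (r, s, p) (a + 1) = (r ++ [mkA s p], a + 1, a + 1) by
        simp [stepA, hne]]
      rw [runA' (a + 1) b (by omega) (r ++ [mkA s p]) (a + 1)]
      rw [ih b (r ++ [mkA s p]) (a + 1) (b - 1) (by omega) hpw']
      simp only [gaps, if_pos (by omega : (1:Int) < b - a)]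
      have : mkA (a + 1) (b - 1)
          = [("start", a + 1), ("end", b - 1), ("n_years", b - a - 1)] := by
        simp [mkA]; omega
      rw [this]; simp
    · have hb : b = a + 1 := by omega
      rw [PySem.List.pyRange_one_eq_nil (by omega : b ≤ a + 1)]
      simp only [List.foldl_nil]
      rw [ih b r s p (by omega) hpw']
      simp [gaps, show ¬ ((1:Int) < b - a) by omega]

theorem headA : ∀ (t : List Int) (a : Int), (a :: t).Pairwise (· < ·) →
    ∀ (m0 : Int) (rest : List Int), mlist a t = m0 :: rest →
    finishA (List.foldl stepA ([], m0, m0) rest) = gaps a t := by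
  intro t
  induction t with
  | nil => intro a _ m0 rest h; simp [mlist] at h
  | cons b t ih =>
    intro a hpw m0 rest h
    have hab : a < b := (List.pairwise_cons.mp hpw).1 b (by simp)
    have hpw' : (b :: t).Pairwise (· < ·) := (List.pairwise_cons.mp hpw).2
    by_cases hgap : a + 1 < b
    · rw [mlist, PySem.List.pyRange_one_cons hgap] at h
      simp only [List.cons_append, List.cons.injEq] at h
      obtain ⟨hm0, hrest⟩ := h
      subst hm0; subst hrest
      rw [List.foldl_append, runA' (a + 1) b (by omega) [] (a + 1)]
      rw [mainA t b [] (a + 1) (b - 1) (by omega) hpw']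
      simp only [gaps, if_pos (by omega : (1:Int) < b - a)]
      have : mkA (a + 1) (b - 1)
          = [("start", a + 1), ("end", b - 1), ("n_years", b - a - 1)] := by
        simp [mkA]; omega
      rw [this]; simp
    · have hb : b = a + 1 := by omega
      rw [mlist, PySem.List.pyRange_one_eq_nil (by omega : b ≤ a + 1), List.nil_append] at h
      rw [ih b hpw' m0 rest h]
      simp [gaps, show ¬ ((1:Int) < b - a) by omega]

theorem gaps_nil_of_mlist_nil : ∀ (t : List Int) (a : Int), (a :: t).Pairwise (· < ·) →
    mlist a t = [] → gaps a t = [] := by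
  intro t
  induction t with
  | nil => intro a _ _; simp [gaps]
  | cons b t ih =>
    intro a hpw h
    have hab : a < b := (List.pairwise_cons.mp hpw).1 b (by simp)
    have hpw' : (b :: t).Pairwise (· < ·) := (List.pairwise_cons.mp hpw).2
    rw [mlist, List.append_eq_nil_iff] at h
    have hb : b ≤ a + 1 := by
      by_contra hc
      rw [PySem.List.pyRange_one_cons (by omega)] at h
      simp at h
    simp only [gaps, if_neg (show ¬ ((1:Int) < b - a) by omega), List.nil_append]
    exact ih b hpw' h.2

-- members of a strictly sorted list are at most its last element
theorem le_getLast_of_pairwise : ∀ (l : List Int) (hne : l ≠ []),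
    l.Pairwise (· < ·) → ∀ y ∈ l, y ≤ l.getLast hne := by
  intro l
  induction l with
  | nil => intro h; exact absurd rfl h
  | cons a t ih =>
    intro _ hpw y hy
    cases t with
    | nil => simp at hy; simp [hy]
    | cons b t' =>
      rw [List.getLast_cons (by simp)]
      rcases List.mem_cons.mp hy with h | h
      · subst h
        have hb : y < b := (List.pairwise_cons.mp hpw).1 b (by simp)
        have := ih (by simp) (List.pairwise_cons.mp hpw).2 b (by simp)
        omega
      · exact ih (by simp) (List.pairwise_cons.mp hpw).2 y h

theorem missing_eq (S : List Int) : ∀ (t : List Int) (a : Int) (_hpw : (a :: t).Pairwise (· < ·)),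
    (∀ y : Int, a ≤ y → (y ∈ S ↔ y ∈ a :: t)) →
    (PySem.List.pyRange a ((a :: t).getLast (by simp) + 1) 1).filter
      (fun y => !(PySem.Set.contains S y)) = mlist a t := by
  intro t
  induction t with
  | nil =>
    intro a hpw hmem
    have : (PySem.List.pyRange a (a + 1) 1) = [a] := PySem.List.pyRange_one_singleton a
    simp only [List.getLast_singleton, this, mlist]
    have ha : a ∈ S := (hmem a le_rfl).mpr (by simp)
    simp [PySem.Set.contains, ha]
  | cons b t ih =>
    intro a hpw hmem
    have hab : a < b := (List.pairwise_cons.mp hpw).1 b (by simp)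
    have hpw' : (b :: t).Pairwise (· < ·) := (List.pairwise_cons.mp hpw).2
    have hlast : (a :: b :: t).getLast (by simp) = (b :: t).getLast (by simp) :=
      List.getLast_cons (by simp)
    have hble : b ≤ (b :: t).getLast (by simp) :=
      le_getLast_of_pairwise (b :: t) (by simp) hpw' b (by simp)
    rw [hlast]
    rw [PySem.List.pyRange_one_append a b ((b :: t).getLast (by simp) + 1)
      (by omega) (by omega)]
    rw [List.filter_append]
    have h1 : (PySem.List.pyRange a b 1).filter (fun y => !(PySem.Set.contains S y))
        = PySem.List.pyRange (a + 1) b 1 := by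
      rw [PySem.List.pyRange_one_cons (by omega : a < b), List.filter_cons]
      have ha : a ∈ S := (hmem a le_rfl).mpr (by simp)
      have hca : (!(PySem.Set.contains S a)) = false := by simp [PySem.Set.contains, ha]
      simp only [hca, Bool.false_eq_true, if_false]
      apply List.filter_eq_self.mpr
      intro y hy
      have hy' := PySem.List.mem_pyRange_one.mp hy
      have hnot : y ∉ S := by
        intro hc
        have := (hmem y (by omega)).mp hc
        rcases List.mem_cons.mp this with h | h
        · omega
        · rcases List.mem_cons.mp h with h | h
          · omega
          · have := List.pairwise_cons.mp hpw'
            have := this.1 y h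
            omega
      simp [PySem.Set.contains, hnot]
    have h2 : (PySem.List.pyRange b ((b :: t).getLast (by simp) + 1) 1).filter
        (fun y => !(PySem.Set.contains S y)) = mlist b t := by
      apply ih b hpw'
      intro y hby
      rw [hmem y (by omega)]
      constructor
      · intro h
        rcases List.mem_cons.mp h with h | h
        · omega
        · exact h
      · intro h; exact List.mem_cons_of_mem a h
    rw [h1, h2, mlist]

-- B's fold over the zipped consecutive pairs produces gaps
theorem foldB : ∀ (t : List Int) (a : Int) (acc : List (List (String × Int))),
    ((a :: t).zip t).foldl
      (fun out (pc : Int × Int) =>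
        if pc.2 - pc.1 > 1 then
          out ++ [[("start", pc.1 + 1), ("end", pc.2 - 1), ("n_years", pc.2 - pc.1 - 1)]]
        else out) acc = acc ++ gaps a t := by
  intro t
  induction t with
  | nil => intro a acc; simp [gaps]
  | cons b t ih =>
    intro a acc
    simp only [List.zip_cons_cons, List.foldl_cons]
    by_cases hgap : (b : Int) - a > 1
    · rw [if_pos hgap, ih b]
      simp [gaps, if_pos (show (1:Int) < b - a by omega)]
    · rw [if_neg hgap, ih b]
      simp [gaps, if_neg (show ¬ ((1:Int) < b - a) by omega)]

theorem sorted_mem (years : List Int) (y : Int) :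
    y ∈ PySem.List.sorted (PySem.Set.ofList years) (fun x => x) false ↔ y ∈ years := by
  rw [PySem.List.mem_sorted, PySem.Set.mem_ofList]

theorem sorted_ne_nil (years : List Int) (h : years ≠ []) :
    PySem.List.sorted (PySem.Set.ofList years) (fun x => x) false ≠ [] := by
  intro hc
  rcases years with _ | ⟨y, ys⟩
  · exact h rfl
  · have : y ∈ ([] : List Int) := by
      rw [← hc, sorted_mem]; simp
    simp at this

-- ===== VERDICT (by name: the statement is the Claim_ definition above) =====
theorem contiguous_missing_years_spec : Claim_equal_contiguous_missing_years := by
  intro years _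
  unfold Spec_contiguous_missing_years contiguous_missing_years contiguous_missing_years_alt
  by_cases hnil : years = []
  · subst hnil; decide
  · rw [if_neg hnil]
    set s := PySem.List.sorted (PySem.Set.ofList years) (fun x => x) false with hs
    have hsne : s ≠ [] := sorted_ne_nil years hnil
    obtain ⟨a, t, hst⟩ := List.exists_cons_of_ne_nil hsne
    have hpw : (a :: t).Pairwise (· < ·) := by
      rw [← hst, hs]; exact PySem.List.sorted_ofList_pairwise_lt years
    -- min/max of years are head/last of s
    have hmin : PySem.List.min? years (fun y => y) = some a := by
      obtain ⟨m, hm⟩ : ∃ m, PySem.List.min? years (fun y => y) = some m := by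
        cases h : PySem.List.min? years (fun y => y) with
        | none => exact absurd ((PySem.List.min?_eq_none_iff _ _).mp h) hnil
        | some m => exact ⟨m, rfl⟩
      have hmem : m ∈ years := PySem.List.min?_mem hm
      have hmin' := PySem.List.min?_isMin hm
      have ham : a ∈ years := (sorted_mem years a).mp (by rw [← hs, hst]; simp)
      have h1 : m ≤ a := hmin' a ham
      have h2 : a ≤ m := by
        have hms : m ∈ a :: t := by rw [← hst, hs]; exact (sorted_mem years m).mpr hmem
        rcases List.mem_cons.mp hms with h | h
        · omega
        · have := (List.pairwise_cons.mp hpw).1 m h; omega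
      rw [hm]; congr 1; omega
    have hmax : PySem.List.max? years (fun y => y)
        = some ((a :: t).getLast (by simp)) := by
      obtain ⟨m, hm⟩ : ∃ m, PySem.List.max? years (fun y => y) = some m := by
        cases h : PySem.List.max? years (fun y => y) with
        | none => exact absurd ((PySem.List.max?_eq_none_iff _ _).mp h) hnil
        | some m => exact ⟨m, rfl⟩
      have hmem : m ∈ years := PySem.List.max?_mem hm
      have hmax' := PySem.List.max?_isMax hm
      have hlm : (a :: t).getLast (by simp) ∈ years := by
        apply (sorted_mem years _).mp
        rw [← hs, hst]; exact List.getLast_mem _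
      have h1 : (a :: t).getLast (by simp) ≤ m := hmax' _ hlm
      have h2 : m ≤ (a :: t).getLast (by simp) := by
        apply le_getLast_of_pairwise (a :: t) (by simp) hpw
        rw [← hst, hs]; exact (sorted_mem years m).mpr hmem
      rw [hm]; congr 1; omega
    rw [hmin, hmax]
    have hmemS : ∀ y : Int, a ≤ y → (y ∈ PySem.Set.ofList years ↔ y ∈ a :: t) := by
      intro y _
      rw [PySem.Set.mem_ofList, ← sorted_mem years y, ← hs, hst]
    have hmiss := missing_eq (PySem.Set.ofList years) t a hpw hmemS
    rw [hst]
    simp only [PySem.List.slice_from_one, List.tail_cons]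
    rw [foldB t a [], List.nil_append]
    rw [hmiss]
    cases hml : mlist a t with
    | nil => exact (gaps_nil_of_mlist_nil t a hpw hml).symm
    | cons m0 rest =>
      rw [show (fun (acc : List (List (String × Int)) × Int × Int) (year : Int) =>
            if year = acc.2.2 + 1 then (acc.1, acc.2.1, year)
            else (acc.1 ++ [[("start", acc.2.1), ("end", acc.2.2),
                             ("n_years", acc.2.2 - acc.2.1 + 1)]], year, year)) = stepA from by
        funext acc y; simp [stepA, mkA]]
      have := headA t a hpw m0 rest hml
      simpa [finishA, mkA] using this
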